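-- pv_equiv track=rewrite | github.com/pendlm1/Python | Math3.py | Hurray
-- ===== SOURCE A (Python) =====
-- def Hurray(n):
--     a = 1
--     result =""
--     for i in range(n):
--         if i == a:
--             result = result + "hurray"
--             a = a*2
--         else:
--             result = result + str(i)
--     return result
-- ===== SOURCE B (Python) =====
-- def Hurray(n):
--     parts = [str(i) for i in range(n)]
--     p = 1
--     while p < n:
--         parts[p] = "hurray"
--         p *= 2
--     return "".join(parts)
-- ===== Notes on version B (the rewrite author's own statement) =====
-- stated objective: alternative
-- what changed: A's single interleaved pass with a doubling counter is replaced by a two-phase construction: build the list of all digit strings first, then a separate O(log n) loop overwrites the power-of-two slots with 'hurray', and join once.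
import Mathlib
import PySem

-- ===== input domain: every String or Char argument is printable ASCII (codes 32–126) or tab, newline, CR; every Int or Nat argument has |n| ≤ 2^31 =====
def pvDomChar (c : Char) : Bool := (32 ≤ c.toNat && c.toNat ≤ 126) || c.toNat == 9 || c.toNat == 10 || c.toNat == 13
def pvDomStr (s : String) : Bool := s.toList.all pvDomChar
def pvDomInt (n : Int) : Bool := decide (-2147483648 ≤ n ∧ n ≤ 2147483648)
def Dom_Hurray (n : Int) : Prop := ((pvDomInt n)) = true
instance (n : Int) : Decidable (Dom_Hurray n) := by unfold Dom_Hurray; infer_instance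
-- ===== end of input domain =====

-- B replaces A's single interleaved pass with a doubling counter by a two-phase
-- construction (build all digit strings, then overwrite the power-of-two slots);
-- objective: alternative decomposition, same asymptotic cost.

-- ===== PORT A =====
def Hurray (n : Int) : String :=
  ((PySem.List.pyRange 0 n 1).foldl
    (fun (st : Int × String) i =>
      if i = st.1 then (st.1 * 2, st.2 ++ "hurray") else (st.1, st.2 ++ PySem.Int.toStr i))
    (1, "")).2

-- ===== PORT B =====
-- fuel makes the 'while p < n' loop total; n.toNat + 1 iterations always suffice
-- because p doubles from 1 (after k steps p = 2^k ≥ k + 1).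
def HurrayAltLoop : Nat → Int → Int → List String → List String
  | 0, _, _, parts => parts
  | fuel + 1, n, p, parts =>
      if p < n then HurrayAltLoop fuel n (p * 2) (parts.set p.toNat "hurray") else parts

def Hurray_alt (n : Int) : String :=
  let parts := (PySem.List.pyRange 0 n 1).map PySem.Int.toStr
  PySem.Str.join "" (HurrayAltLoop (n.toNat + 1) n 1 parts)

-- ===== PRECONDITION & SPEC =====
def Spec_Hurray (n : Int) (out : String) : Prop := out = Hurray_alt n
instance (n : Int) (out : String) : Decidable (Spec_Hurray n out) := by unfold Spec_Hurray; infer_instance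

-- ===== CLAIM (what is proved, stated in full; the proofs are below) =====
def Claim_equal_Hurray : Prop := ∀ (n : Int), Dom_Hurray n → Spec_Hurray n (Hurray n)

-- ===== LEMMAS AND PROOFS =====

-- A's counter 'a' after the first k iterations
def aseqN : Nat → Nat
  | 0 => 1
  | k + 1 => if k = aseqN k then 2 * aseqN k else aseqN k

lemma aseqN_succ_pos (k : Nat) (h : k = aseqN k) : aseqN (k + 1) = 2 * aseqN k := by
  rw [aseqN, if_pos h]

lemma aseqN_succ_neg (k : Nat) (h : ¬ k = aseqN k) : aseqN (k + 1) = aseqN k := by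
  rw [aseqN, if_neg h]

-- what A appends for index i
def piece (i : Nat) : String :=
  if i = aseqN i then "hurray" else PySem.Int.toStr (i : Int)

def M (k : Nat) : List String := (List.range k).map piece

-- Boolean: i is a power of two with exponent ≥ j
def isPowGe (j i : Nat) : Bool :=
  (List.range (i + 1)).any (fun k => decide (j ≤ k) && decide (i = 2 ^ k))

lemma isPowGe_iff (j i : Nat) : isPowGe j i = true ↔ ∃ k, j ≤ k ∧ i = 2 ^ k := by
  unfold isPowGe
  simp only [List.any_eq_true, List.mem_range, Bool.and_eq_true, decide_eq_true_eq]
  constructor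
  · rintro ⟨k, -, hj, hk⟩; exact ⟨k, hj, hk⟩
  · rintro ⟨k, hj, hk⟩
    exact ⟨k, by have := Nat.lt_two_pow_self (n := k); omega, hj, hk⟩

lemma aseqN_inv (i : Nat) :
    ∃ e, aseqN i = 2 ^ e ∧ i ≤ aseqN i ∧ (i = 0 ∨ aseqN i < 2 * i) := by
  induction i with
  | zero => exact ⟨0, rfl, by omega, Or.inl rfl⟩
  | succ k ih =>
    obtain ⟨e, he, hle, hlt⟩ := ih
    by_cases h : k = aseqN k
    · refine ⟨e + 1, ?_, ?_, ?_⟩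
      · rw [aseqN_succ_pos k h, he, pow_succ]; ring
      · rw [aseqN_succ_pos k h]
        have h1 : 1 ≤ aseqN k := by rw [he]; exact Nat.one_le_two_pow
        omega
      · rw [aseqN_succ_pos k h]; right; omega
    · refine ⟨e, ?_, ?_, ?_⟩
      · rw [aseqN_succ_neg k h]; exact he
      · rw [aseqN_succ_neg k h]; omega
      · rw [aseqN_succ_neg k h]; right
        rcases hlt with h0 | h2
        · have h1 : aseqN k = 1 := by rw [h0]; rfl
          omega
        · omega

lemma aseqN_char (i : Nat) : i = aseqN i ↔ isPowGe 0 i = true := by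
  rw [isPowGe_iff]
  obtain ⟨e, he, hle, hlt⟩ := aseqN_inv i
  constructor
  · intro h; exact ⟨e, Nat.zero_le e, by omega⟩
  · rintro ⟨k, -, hk⟩
    have h1 : (1 : Nat) ≤ 2 ^ k := Nat.one_le_two_pow
    have hi1 : 1 ≤ i := by omega
    have hke : k ≤ e := by
      have : (2 : Nat) ^ k ≤ 2 ^ e := by omega
      exact (Nat.pow_le_pow_iff_right (by norm_num)).1 this
    have hek : e ≤ k := by
      by_contra hgt
      rw [not_le] at hgt
      have hp : (2 : Nat) ^ (k + 1) ≤ 2 ^ e := Nat.pow_le_pow_right (by norm_num) hgt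
      have h2 : aseqN i < 2 * i := by
        rcases hlt with h0 | h2
        · omega
        · exact h2
      rw [he, hk] at h2
      rw [pow_succ] at hp
      omega
    have hek' : e = k := by omega
    rw [he, hek']
    exact hk

lemma piece_eq (i : Nat) :
    piece i = if isPowGe 0 i then "hurray" else PySem.Int.toStr (i : Int) := by
  unfold piece
  by_cases h : i = aseqN i
  · rw [if_pos h, (aseqN_char i).1 h]; rfl
  · have hb : isPowGe 0 i = false := by
      rw [Bool.eq_false_iff]; intro hc; exact h ((aseqN_char i).2 hc)
    rw [if_neg h, hb]; rfl

-- ----- A side -----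

lemma join_nil_str : PySem.Str.join "" ([] : List String) = "" := by decide

lemma join_append_singleton (l : List String) (x : String) :
    PySem.Str.join "" (l ++ [x]) = PySem.Str.join "" l ++ x := by
  have h : ∀ (cs : List (List Char)) (xs : List Char),
      PySem.Chars.join [] (cs ++ [xs]) = PySem.Chars.join [] cs ++ xs := by
    intro cs xs
    induction cs with
    | nil => simp [PySem.Chars.join, List.intercalate]
    | cons c rest ih =>
      cases rest with
      | nil => simp [PySem.Chars.join, List.intercalate, List.intersperse]
      | cons d rs =>
        have h2 := PySem.Chars.join_cons_cons [] c d (rs ++ [xs])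
        have h1 := PySem.Chars.join_cons_cons [] c d rs
        have ih' : PySem.Chars.join [] (d :: (rs ++ [xs]))
            = PySem.Chars.join [] (d :: rs) ++ xs := by simpa using ih
        simp only [List.cons_append] at h2 ⊢
        rw [h2, ih', h1]
        simp [List.append_assoc]
  apply String.toList_inj.1
  simp [PySem.Str.toList_join, h]

lemma M_succ (k : Nat) :
    PySem.Str.join "" (M (k + 1)) = PySem.Str.join "" (M k) ++ piece k := by
  rw [M, List.range_succ, List.map_append, List.map_singleton, join_append_singleton]
  rfl

lemma foldA (k : Nat) :
    ((List.range k).map (fun (j : Nat) => (j : Int))).foldl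
      (fun (st : Int × String) i =>
        if i = st.1 then (st.1 * 2, st.2 ++ "hurray") else (st.1, st.2 ++ PySem.Int.toStr i))
      (1, "")
    = (((aseqN k : Nat) : Int), PySem.Str.join "" (M k)) := by
  induction k with
  | zero => simp [M, join_nil_str, aseqN]
  | succ k ih =>
    rw [List.range_succ, List.map_append, List.foldl_append, ih]
    simp only [List.map_cons, List.map_nil, List.foldl_cons, List.foldl_nil]
    by_cases h : k = aseqN k
    · rw [if_pos (show ((k : Nat) : Int) = ((aseqN k : Nat) : Int) from by exact_mod_cast h)]
      have hp : piece k = "hurray" := by rw [piece, if_pos h]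
      rw [M_succ, hp, aseqN_succ_pos k h, Prod.mk.injEq]
      exact ⟨by push_cast; ring, rfl⟩
    · rw [if_neg (fun hc => h (by exact_mod_cast hc))]
      have hp : piece k = PySem.Int.toStr (k : Int) := by rw [piece, if_neg h]
      rw [M_succ, hp, aseqN_succ_neg k h]

lemma HurrayA_eq (n : Int) : Hurray n = PySem.Str.join "" (M n.toNat) := by
  unfold Hurray
  rw [PySem.List.pyRange_one]
  simp only [sub_zero, zero_add]
  rw [foldA]

-- ----- B side -----

lemma loopB (fuel : Nat) (j : Nat) (n : Int) (l : List String)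
    (hn : n = (l.length : Int)) (hf : l.length ≤ 2 ^ j + fuel) :
    (HurrayAltLoop fuel n ((2 : Int) ^ j) l).length = l.length ∧
    ∀ i, i < l.length →
      (HurrayAltLoop fuel n ((2 : Int) ^ j) l).getD i "" =
        if isPowGe j i then "hurray" else l.getD i "" := by
  induction fuel generalizing j l with
  | zero =>
    refine ⟨rfl, fun i h => ?_⟩
    have hfalse : isPowGe j i = false := by
      rw [Bool.eq_false_iff]
      intro hc
      obtain ⟨k, hjk, hk⟩ := (isPowGe_iff j i).1 hc
      have : (2 : Nat) ^ j ≤ 2 ^ k := Nat.pow_le_pow_right (by norm_num) hjk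
      omega
    simp [HurrayAltLoop, hfalse]
  | succ fuel ih =>
    have hcast : (((2 : Nat) ^ j : Nat) : Int) = (2 : Int) ^ j := by push_cast; ring
    by_cases hpn : ((2 : Int) ^ j < n)
    · have hjl : 2 ^ j < l.length := by omega
      have hstep : HurrayAltLoop (fuel + 1) n ((2 : Int) ^ j) l
          = HurrayAltLoop fuel n ((2 : Int) ^ (j + 1)) (l.set (2 ^ j) "hurray") := by
        show (if ((2 : Int) ^ j) < n then _ else _) = _
        have e1 : ((2 : Int) ^ j) * 2 = (2 : Int) ^ (j + 1) := by ring
        have e2 : ((2 : Int) ^ j).toNat = 2 ^ j := by rw [← hcast, Int.toNat_natCast]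
        rw [if_pos hpn, e1, e2]
      have hlen' : (l.set (2 ^ j) "hurray").length = l.length := by simp
      have hf' : (l.set (2 ^ j) "hurray").length ≤ 2 ^ (j + 1) + fuel := by
        rw [hlen']
        have h1 : (1 : Nat) ≤ 2 ^ j := Nat.one_le_two_pow
        have h2 : (2 : Nat) ^ (j + 1) = 2 ^ j * 2 := pow_succ 2 j
        omega
      obtain ⟨ihlen, ihget⟩ := ih (j + 1) (l.set (2 ^ j) "hurray")
        (by rw [hlen']; exact hn) hf'
      rw [hstep]
      refine ⟨by rw [ihlen, hlen'], fun i h => ?_⟩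
      rw [ihget i (by omega)]
      by_cases hi : i = 2 ^ j
      · subst hi
        have h1 : isPowGe j (2 ^ j) = true := (isPowGe_iff _ _).2 ⟨j, le_refl j, rfl⟩
        have hset : (l.set (2 ^ j) "hurray").getD (2 ^ j) "" = "hurray" := by
          rw [List.getD_eq_getElem?_getD, List.getElem?_set_self hjl]
          rfl
        rw [h1, hset]
        by_cases h2 : isPowGe (j + 1) (2 ^ j) = true
        · simp [h2]
        · rw [Bool.not_eq_true] at h2
          simp [h2]
      · have hne : isPowGe (j + 1) i = isPowGe j i := by
          by_cases hA : isPowGe j i = true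
          · obtain ⟨k, hjk, hik⟩ := (isPowGe_iff _ _).1 hA
            have hkj : k ≠ j := fun hkj => hi (by rw [hik, hkj])
            rw [hA, (isPowGe_iff _ _).2 ⟨k, by omega, hik⟩]
          · have hB : ¬ isPowGe (j + 1) i = true := by
              intro hc
              obtain ⟨k, hjk, hik⟩ := (isPowGe_iff _ _).1 hc
              exact hA ((isPowGe_iff _ _).2 ⟨k, by omega, hik⟩)
            rw [Bool.not_eq_true] at hA hB
            rw [hA, hB]
        have hset : (l.set (2 ^ j) "hurray").getD i "" = l.getD i "" := by
          rw [List.getD_eq_getElem?_getD, List.getElem?_set_ne (fun hc => hi hc.symm),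
              ← List.getD_eq_getElem?_getD]
        rw [hne, hset]
    · have hstep : HurrayAltLoop (fuel + 1) n ((2 : Int) ^ j) l = l := by
        show (if ((2 : Int) ^ j) < n then _ else _) = _
        rw [if_neg hpn]
      rw [hstep]
      refine ⟨rfl, fun i h => ?_⟩
      have hfalse : isPowGe j i = false := by
        rw [Bool.eq_false_iff]
        intro hc
        obtain ⟨k, hjk, hk⟩ := (isPowGe_iff j i).1 hc
        have h1 : (2 : Nat) ^ j ≤ 2 ^ k := Nat.pow_le_pow_right (by norm_num) hjk
        omega
      simp [hfalse]

lemma HurrayB_eq (n : Int) : Hurray_alt n = PySem.Str.join "" (M n.toNat) := by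
  unfold Hurray_alt
  rw [PySem.List.pyRange_one]
  simp only [sub_zero, zero_add, List.map_map]
  by_cases hn : n ≤ 0
  · have h0 : n.toNat = 0 := Int.toNat_of_nonpos hn
    rw [h0]
    have hloop : HurrayAltLoop (0 + 1) n 1
        ((List.range 0).map (PySem.Int.toStr ∘ fun (k : Nat) => (k : Int))) = [] := by
      show (if (1 : Int) < n then _ else _) = _
      rw [if_neg (by omega)]
      simp
    rw [hloop, M]
    simp
  · rw [not_le] at hn
    set l : List String := (List.range n.toNat).map (PySem.Int.toStr ∘ fun (k : Nat) => (k : Int)) with hl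
    have hlen : l.length = n.toNat := by rw [hl]; simp
    have hncast : n = (l.length : Int) := by
      rw [hlen, Int.toNat_of_nonneg (by omega)]
    have hone : (1 : Int) = (2 : Int) ^ (0 : Nat) := by norm_num
    rw [hone]
    obtain ⟨hL, hG⟩ := loopB (n.toNat + 1) 0 n l hncast (by rw [hlen]; omega)
    congr 1
    apply List.ext_getElem
    · rw [hL, hlen, M]
      simp
    · intro i h1 h2
      have hiM : i < n.toNat := by
        rw [M] at h2
        simpa using h2
      have hil : i < l.length := by omega
      rw [← List.getD_eq_getElem _ "" h1, hG i hil]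
      have hMl : (M n.toNat)[i]'h2 = piece i := by
        simp [M]
      rw [hMl, piece_eq]
      have hli : l.getD i "" = PySem.Int.toStr (i : Int) := by
        simp [hl, List.getD_eq_getElem?_getD, hiM]
      rw [hli]

-- ===== VERDICT (by name: the statement is the Claim_ definition above) =====
theorem Hurray_spec : Claim_equal_Hurray := by
  intro n _
  show Hurray n = Hurray_alt n
  rw [HurrayA_eq, HurrayB_eq]
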